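-- pv_equiv track=rewrite | github.com/pypi-data/pypi-mirror-403 | packages/oarepo-model/oarepo_model-0.1.0.dev50.tar.gz/oarepo_model-0.1.0.dev50/src/oarepo_model/presets/records_resources/records/pid_provider.py | make_pid_type
-- ===== SOURCE A (Python) =====
-- MAX_PID_LENGTH = 6
--
-- def make_pid_type(base_name: str) -> str:
--     """Generate a PID type based on the base name of the model.
--
--     The PID type is maximum of 6 characters long and is derived from the base name
--     of the model as:
--
--     1. Convert the base name to lowercase.
--     2. Remove all non alphabetic characters.
--     3. If too long, start removing vowels from the end until it fits.
--     4. if still too long, remove middle characters until it fits.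
--     """
--     pid_type = base_name.lower()
--     pid_type = "".join(c for c in pid_type if c.isalpha())
--     if len(pid_type) < MAX_PID_LENGTH:
--         return pid_type
--
--     # Remove vowels from the end
--     vowels = "aeiou"
--     while len(pid_type) > MAX_PID_LENGTH:
--         for i in range(len(pid_type) - 1, -1, -1):
--             if pid_type[i] in vowels:
--                 pid_type = pid_type[:i] + pid_type[i + 1 :]
--                 break
--         else:
--             # No vowels found, break the loop
--             break
--
--     if len(pid_type) <= MAX_PID_LENGTH:
--         return pid_type
--
--     # If still too long, remove characters from the middle
--     while len(pid_type) > MAX_PID_LENGTH: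
--         mid_index = len(pid_type) // 2
--         pid_type = pid_type[:mid_index] + pid_type[mid_index + 1 :]
--
--     return pid_type
-- ===== SOURCE B (Python) =====
-- MAX_PID_LENGTH = 6
--
-- def make_pid_type(base_name: str) -> str:
--     """One pass: drop the last (len-6) vowels in a single reverse sweep,
--     then, if still too long, keep the first 3 and last 3 characters
--     (which is exactly what repeated middle deletion leaves)."""
--     s = [c for c in base_name.lower() if c.isalpha()]
--     excess = len(s) - MAX_PID_LENGTH
--     if excess > 0:
--         kept_rev = []
--         removed = 0
--         for c in reversed(s):
--             if removed < excess and c in "aeiou":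
--                 removed += 1
--             else:
--                 kept_rev.append(c)
--         s = kept_rev[::-1]
--     if len(s) > MAX_PID_LENGTH:
--         s = s[:3] + s[-3:]
--     return "".join(s)
-- ===== Notes on version B (the rewrite author's own statement) =====
-- stated objective: faster
-- what changed: A repeatedly rescans and reslices the string (find-last-vowel per removal, then one middle deletion per excess character, both O(n) each); B does one reverse sweep that drops the last len-6 vowels and then takes the closed form first-3 + last-3 characters that repeated middle deletion provably leaves.
import Mathlib
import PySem

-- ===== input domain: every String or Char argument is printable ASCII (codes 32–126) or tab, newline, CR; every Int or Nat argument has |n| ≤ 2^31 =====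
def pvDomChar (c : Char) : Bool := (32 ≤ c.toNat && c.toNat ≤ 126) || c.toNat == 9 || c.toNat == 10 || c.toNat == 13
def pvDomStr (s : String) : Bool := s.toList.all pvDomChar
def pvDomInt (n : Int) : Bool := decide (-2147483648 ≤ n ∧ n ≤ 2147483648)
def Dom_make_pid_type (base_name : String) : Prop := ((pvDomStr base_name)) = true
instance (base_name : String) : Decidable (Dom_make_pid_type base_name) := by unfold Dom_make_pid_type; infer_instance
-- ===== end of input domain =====

-- B replaces A's quadratic delete-one-vowel-at-a-time and delete-middle loops by a single
-- reverse sweep dropping the last (len-6) vowels and the closed form first3++last3 (objective: faster).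

-- ===== PORT A =====

-- `c in "aeiou"` for a single character
def pvIsVowel (c : Char) : Bool := ['a', 'e', 'i', 'o', 'u'].contains c

-- A's `while len > 6: for i in range(len-1,-1,-1): if s[i] in vowels: s = s[:i]+s[i+1:]; break; else: break`
-- (fuel-guarded: each iteration removes one character, so s.length iterations always suffice)
def pvVowelLoopF (fuel : Nat) (s : List Char) : List Char :=
  match fuel with
  | 0 => s
  | fuel + 1 =>
    if 6 < s.length then
      match (PySem.List.pyRange ((s.length : Int) - 1) (-1) (-1)).find?
          (fun i => pvIsVowel (PySem.List.pyGetD s i ' ')) with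
      | some i =>
          pvVowelLoopF fuel (PySem.List.slice s none (some i) ++ PySem.List.slice s (some (i + 1)) none)
      | none => s
    else s

def pvVowelLoop (s : List Char) : List Char := pvVowelLoopF s.length s

-- A's `while len > 6: mid = len // 2; s = s[:mid] + s[mid+1:]`  (same fuel guard)
def pvMidLoopF (fuel : Nat) (s : List Char) : List Char :=
  match fuel with
  | 0 => s
  | fuel + 1 =>
    if 6 < s.length then
      pvMidLoopF fuel (PySem.List.slice s none (some (PySem.Int.floordiv (s.length : Int) 2)) ++
        PySem.List.slice s (some (PySem.Int.floordiv (s.length : Int) 2 + 1)) none)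
    else s

def pvMidLoop (s : List Char) : List Char := pvMidLoopF s.length s

def make_pid_type (base_name : String) : String :=
  let pid := (PySem.Chars.lower base_name.toList).filter PySem.Chars.isalpha
  if pid.length < 6 then String.ofList pid
  else
    let pid2 := pvVowelLoop pid
    if pid2.length ≤ 6 then String.ofList pid2
    else String.ofList (pvMidLoop pid2)

-- ===== PORT B =====

-- one step of Source B's reverse sweep: skip a vowel while budget remains, else keep
def pvDropStep (excess : Int) (acc : List Char × Int) (c : Char) : List Char × Int :=
  if acc.2 < excess ∧ pvIsVowel c then (acc.1, acc.2 + 1) else (acc.1 ++ [c], acc.2)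

def make_pid_type_alt (base_name : String) : String :=
  let s := (PySem.Chars.lower base_name.toList).filter PySem.Chars.isalpha
  let excess : Int := (s.length : Int) - 6
  let s2 := if 0 < excess then ((s.reverse.foldl (pvDropStep excess) ([], 0)).1).reverse else s
  if 6 < s2.length then
    String.ofList (PySem.List.slice s2 none (some 3) ++ PySem.List.slice s2 (some (-3)) none)
  else String.ofList s2

-- ===== PRECONDITION & SPEC =====
def Spec_make_pid_type (base_name : String) (out : String) : Prop := out = make_pid_type_alt base_name
instance (base_name : String) (out : String) : Decidable (Spec_make_pid_type base_name out) := by unfold Spec_make_pid_type; infer_instance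

-- ===== CLAIM (what is proved, stated in full; the proofs are below) =====
def Claim_equal_make_pid_type : Prop := ∀ (base_name : String), Dom_make_pid_type base_name → Spec_make_pid_type base_name (make_pid_type base_name)

-- ===== LEMMAS AND PROOFS =====

-- common spec of both vowel phases: drop the first b vowels of the (reversed) list
def pvDropKV : Int → List Char → List Char
  | _, [] => []
  | b, c :: t => if 0 < b ∧ pvIsVowel c then pvDropKV (b - 1) t else c :: pvDropKV b t

theorem pvDropKV_nonpos (b : Int) (l : List Char) (hb : b ≤ 0) : pvDropKV b l = l := by
  induction l with
  | nil => rfl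
  | cons c t ih => simp [pvDropKV, ih]; omega

theorem pvDropKV_append_novowel (b : Int) (u l : List Char)
    (hu : ∀ c ∈ u, pvIsVowel c = false) : pvDropKV b (u ++ l) = u ++ pvDropKV b l := by
  induction u with
  | nil => rfl
  | cons c t ih =>
      have hc := hu c (by simp)
      simp [pvDropKV, hc, ih fun d hd => hu d (by simp [hd])]

theorem pvDropKV_novowel (b : Int) (u : List Char)
    (hu : ∀ c ∈ u, pvIsVowel c = false) : pvDropKV b u = u := by
  have h := pvDropKV_append_novowel b u [] hu
  simp [pvDropKV] at h
  exact h

-- Source B's fold computes pvDropKV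
theorem pvFoldl_dropStep (excess : Int) (l : List Char) :
    ∀ (acc : List Char) (r : Int),
      (l.foldl (pvDropStep excess) (acc, r)).1 = acc ++ pvDropKV (excess - r) l := by
  induction l with
  | nil => intro acc r; simp [pvDropKV]
  | cons c t ih =>
      intro acc r
      simp only [List.foldl_cons, pvDropStep]
      by_cases h : r < excess ∧ pvIsVowel c = true
      · rw [if_pos h, ih]
        have h1 : pvDropKV (excess - r) (c :: t) = pvDropKV (excess - r - 1) t := by
          simp only [pvDropKV, h.2, and_true, if_pos (by omega : (0:Int) < excess - r)]
        have h2 : excess - (r + 1) = excess - r - 1 := by ring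
        rw [h1, h2]
      · rw [if_neg h, ih]
        have hcond : ¬ ((0:Int) < excess - r ∧ pvIsVowel c = true) := by
          rintro ⟨h1', h2'⟩; exact h ⟨by omega, h2'⟩
        have h1 : pvDropKV (excess - r) (c :: t) = c :: pvDropKV (excess - r) t := by
          simp only [pvDropKV, if_neg hcond]
        rw [h1]
        simp

-- A's vowel loop is pvDropKV with budget len-6 on the reversed list
theorem pvVowelLoop_eq_aux : ∀ (n : Nat) (s : List Char), s.length ≤ n →
    pvVowelLoopF n s = (pvDropKV ((s.length : Int) - 6) s.reverse).reverse := by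
  intro n
  induction n with
  | zero =>
      intro s hs
      have : s = [] := List.eq_nil_of_length_eq_zero (by omega)
      subst this
      rw [pvVowelLoopF]
      simp [pvDropKV]
  | succ n ih =>
      intro s hs
      rw [pvVowelLoopF]
      by_cases h6 : 6 < s.length
      · rw [if_pos h6]
        split
        next i hf =>
            have hp := List.find?_eq_some_iff_append.mp hf
            obtain ⟨hpi, as, bs, hsplit, hnotas⟩ := hp
            have hmem : i ∈ PySem.List.pyRange ((s.length : Int) - 1) (-1) (-1) :=
              List.mem_of_find?_eq_some hf
            rw [PySem.List.mem_pyRange_neg_one] at hmem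
            -- indices above i carry no vowel
            have hpair : (PySem.List.pyRange ((s.length : Int) - 1) (-1) (-1)).Pairwise (· > ·) := by
              rw [PySem.List.pyRange_neg_one_eq_reverse, List.pairwise_reverse]
              exact PySem.List.pairwise_lt_pyRange_one _ _
            have habove : ∀ j : Int, i < j → j ≤ (s.length : Int) - 1 →
                pvIsVowel (PySem.List.pyGetD s j ' ') = false := by
              intro j hij hjlen
              have hjmem : j ∈ PySem.List.pyRange ((s.length : Int) - 1) (-1) (-1) := by
                rw [PySem.List.mem_pyRange_neg_one]; omega
              rw [hsplit] at hjmem hpair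
              rcases List.mem_append.mp hjmem with hja | hjb
              · have hna := hnotas _ hja
                rwa [Bool.not_eq_true'] at hna
              · rcases List.mem_cons.mp hjb with rfl | hjb
                · omega
                · exfalso
                  have hpc := (List.pairwise_append.mp hpair).2.1
                  have hgt := (List.pairwise_cons.mp hpc).1 j hjb
                  omega
            -- decompose s around the last vowel
            set k := i.toNat with hk
            clear_value k
            have hklen : k < s.length := by omega
            have hik : (k : Int) = i := by omega
            have hvk : pvIsVowel s[k] = true := by
              have h' := hpi
              rw [← hik, PySem.List.pyGetD_natCast, List.getD_eq_getElem _ _ hklen] at h'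
              exact h'
            have hw : ∀ c ∈ s.drop (k + 1), pvIsVowel c = false := by
              intro c hc
              obtain ⟨m, hm, rfl⟩ := List.mem_iff_getElem.mp hc
              rw [List.getElem_drop]
              have hlen : k + 1 + m < s.length := by
                rw [List.length_drop] at hm; omega
              have := habove ((k : Int) + 1 + m) (by omega) (by omega)
              have hcast : ((k : Int) + 1 + m) = ((k + 1 + m : Nat) : Int) := by push_cast; ring
              rw [hcast, PySem.List.pyGetD_natCast, List.getD_eq_getElem _ _ hlen] at this
              exact this
            -- the removal step
            rw [PySem.List.slice_to s (by omega), PySem.List.slice_from s (by omega), ← hik]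
            have ht1 : ((k : Int)).toNat = k := by omega
            have ht2 : ((k : Int) + 1).toNat = k + 1 := by omega
            rw [ht1, ht2]
            have hlens : (s.take k ++ s.drop (k + 1)).length = s.length - 1 := by
              simp only [List.length_append, List.length_take, List.length_drop]
              omega
            have hle1 : (s.take k ++ s.drop (k + 1)).length ≤ n := by rw [hlens]; simpa using Nat.sub_le_sub_right hs 1
            rw [ih _ hle1]
            have hdecomp : s = s.take k ++ s[k] :: s.drop (k + 1) := by
              conv_lhs => rw [← List.take_append_drop k s]
              rw [List.drop_eq_getElem_cons hklen]
            have hrev2 : (s.take k ++ s.drop (k + 1)).reverse =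
                (s.drop (k + 1)).reverse ++ (s.take k).reverse := by
              simp
            have hrev : s.reverse = (s.drop (k + 1)).reverse ++ s[k] :: (s.take k).reverse := by
              conv_lhs => rw [hdecomp]
              simp
            have hwrev : ∀ c ∈ (s.drop (k + 1)).reverse, pvIsVowel c = false := by
              intro c hc; exact hw c (List.mem_reverse.mp hc)
            rw [hlens, hrev, hrev2]
            rw [pvDropKV_append_novowel _ _ _ hwrev, pvDropKV_append_novowel _ _ _ hwrev]
            have hstep : pvDropKV ((s.length : Int) - 6) (s[k] :: (s.take k).reverse) =
                pvDropKV ((s.length : Int) - 6 - 1) (s.take k).reverse := by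
              simp only [pvDropKV, hvk, and_true, if_pos (by omega : (0:Int) < (s.length : Int) - 6)]
            have hc : ((s.length - 1 : Nat) : Int) - 6 = (s.length : Int) - 6 - 1 := by omega
            rw [hstep, hc]
        next hf =>
            -- no vowel anywhere in s
            have hnv : ∀ c ∈ s.reverse, pvIsVowel c = false := by
              intro c hc
              rw [List.mem_reverse] at hc
              obtain ⟨j, hj, rfl⟩ := List.mem_iff_getElem.mp hc
              have hmem : (j : Int) ∈ PySem.List.pyRange ((s.length : Int) - 1) (-1) (-1) := by
                rw [PySem.List.mem_pyRange_neg_one]; omega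
              have hth := List.find?_eq_none.mp hf _ hmem
              rw [PySem.List.pyGetD_natCast, List.getD_eq_getElem _ _ hj] at hth
              simpa using hth
            rw [pvDropKV_novowel _ _ hnv, List.reverse_reverse]
      · rw [if_neg h6]
        rw [pvDropKV_nonpos _ _ (by omega), List.reverse_reverse]

theorem pvVowelLoop_eq (s : List Char) :
    pvVowelLoop s = (pvDropKV ((s.length : Int) - 6) s.reverse).reverse :=
  pvVowelLoop_eq_aux s.length s le_rfl

-- A's middle-deletion loop keeps the first 3 and last 3 characters
theorem pvMidLoop_eq_aux : ∀ (n : Nat) (s : List Char), s.length ≤ n → 6 ≤ s.length →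
    pvMidLoopF n s = s.take 3 ++ s.drop (s.length - 3) := by
  intro n
  induction n with
  | zero => intro s hs h6; omega
  | succ n ih =>
      intro s hs h6
      rw [pvMidLoopF]
      by_cases hlen : 6 < s.length
      · rw [if_pos hlen]
        have hm : PySem.Int.floordiv (s.length : Int) 2 = ((s.length / 2 : Nat) : Int) := by
          exact_mod_cast PySem.Int.floordiv_natCast s.length 2
        rw [hm, PySem.List.slice_to s (by omega), PySem.List.slice_from s (by omega)]
        have ht1 : ((s.length / 2 : Nat) : Int).toNat = s.length / 2 := by omega
        have ht2 : (((s.length / 2 : Nat) : Int) + 1).toNat = s.length / 2 + 1 := by omega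
        rw [ht1, ht2]
        set m := s.length / 2 with hmdef
        clear_value m
        have hm3 : 3 ≤ m := by omega
        have hm4 : m + 4 ≤ s.length := by omega
        have hlens : (s.take m ++ s.drop (m + 1)).length = s.length - 1 := by
          simp only [List.length_append, List.length_take, List.length_drop]
          omega
        have hle1 : (s.take m ++ s.drop (m + 1)).length ≤ n := by rw [hlens]; simpa using Nat.sub_le_sub_right hs 1
        have hle2 : 6 ≤ (s.take m ++ s.drop (m + 1)).length := by rw [hlens]; exact Nat.le_sub_one_of_lt hlen
        rw [ih _ hle1 hle2, hlens]
        congr 1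
        · -- take 3 agrees
          rw [List.take_append_of_le_length (by simp; omega), List.take_take]
          congr 1
          omega
        · -- drop agrees
          have hsplitn : s.length - 1 - 3 = (s.take m).length + (s.length - 4 - m) := by
            simp only [List.length_take]
            omega
          rw [hsplitn, List.drop_append,
            List.drop_eq_nil_of_le (by simp only [List.length_take]; omega), List.nil_append,
            List.drop_drop]
          congr 1
          simp only [List.length_take, Nat.min_eq_left (show m ≤ s.length by omega)]
          omega
      · rw [if_neg hlen]
        have h36 : s.length - 3 = 3 := by omega
        rw [h36]
        exact (List.take_append_drop 3 s).symm

theorem pvMidLoop_eq (s : List Char) (h6 : 6 ≤ s.length) :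
    pvMidLoop s = s.take 3 ++ s.drop (s.length - 3) :=
  pvMidLoop_eq_aux s.length s le_rfl h6

-- ===== VERDICT (by name: the statement is the Claim_ definition above) =====
theorem make_pid_type_spec : Claim_equal_make_pid_type := by
  intro base_name _
  unfold Spec_make_pid_type make_pid_type make_pid_type_alt
  dsimp only
  set s := (PySem.Chars.lower base_name.toList).filter PySem.Chars.isalpha with hs
  -- both vowel phases give the same list
  have hsame : pvVowelLoop s =
      (if 0 < (s.length : Int) - 6 then ((s.reverse.foldl (pvDropStep ((s.length : Int) - 6)) ([], 0)).1).reverse else s) := by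
    rw [pvVowelLoop_eq]
    by_cases hx : 0 < (s.length : Int) - 6
    · rw [if_pos hx, pvFoldl_dropStep]
      simp
    · rw [if_neg hx, pvDropKV_nonpos _ _ (by omega), List.reverse_reverse]
  by_cases hlt : s.length < 6
  · rw [if_pos hlt]
    rw [if_neg (show ¬ (0:Int) < (s.length : Int) - 6 by omega)]
    rw [if_neg (show ¬ 6 < s.length by omega)]
  · rw [if_neg hlt]
    rw [← hsame]
    set s2 := pvVowelLoop s with hs2
    by_cases hle : s2.length ≤ 6
    · rw [if_pos hle, if_neg (by omega)]
    · rw [if_neg hle, if_pos (by omega)]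
      rw [pvMidLoop_eq _ (by omega)]
      rw [PySem.List.slice_to s2 (by omega)]
      rw [PySem.List.slice_from_neg_ofNat s2 3 (by omega)]
      rfl
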